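-- pv_equiv track=rewrite | github.com/asnar00/zeta | zeta.py | _extract_harness_body
-- ===== SOURCE A (Python) =====
-- def _extract_harness_body(harness: str) -> str:
--     """Extract the body of a platform harness, stripping its wrapper."""
--     lines = harness.strip().split("\n")
--     body_lines = []
--     in_body = False
--     for line in lines:
--         stripped = line.strip()
--         if stripped.startswith("import sys") or stripped.startswith("# "):
--             continue
--         if stripped.startswith("if __name__"):
--             in_body = True
--             continue
--         if in_body:
--             body_lines.append(line)
--         elif stripped:
--             body_lines.append(line)
--     return "\n".join(body_lines) if body_lines else ""
-- ===== SOURCE B (Python) =====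
-- def _extract_harness_body(harness: str) -> str:
--     """Extract the body of a platform harness, stripping its wrapper."""
--     lines = harness.strip().split("\n")
--
--     def _dropped(line):
--         s = line.strip()
--         return s.startswith("import sys") or s.startswith("# ")
--
--     def _marker(line):
--         return line.strip().startswith("if __name__")
--
--     idx = next((i for i, l in enumerate(lines) if _marker(l)), None)
--     if idx is None:
--         kept = [l for l in lines if not _dropped(l) and l.strip()]
--     else:
--         head = [l for l in lines[:idx] if not _dropped(l) and l.strip()]
--         tail = [l for l in lines[idx + 1:] if not _dropped(l) and not _marker(l)]
--         kept = head + tail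
--     return "\n".join(kept)
-- ===== Notes on version B (the rewrite author's own statement) =====
-- stated objective: alternative
-- what changed: Replaces A's single stateful pass with an in_body flag by first locating the index of the first wrapper-marker line, then filtering the head (blanks dropped) and tail (blanks kept) regions independently and concatenating.
import Mathlib
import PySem

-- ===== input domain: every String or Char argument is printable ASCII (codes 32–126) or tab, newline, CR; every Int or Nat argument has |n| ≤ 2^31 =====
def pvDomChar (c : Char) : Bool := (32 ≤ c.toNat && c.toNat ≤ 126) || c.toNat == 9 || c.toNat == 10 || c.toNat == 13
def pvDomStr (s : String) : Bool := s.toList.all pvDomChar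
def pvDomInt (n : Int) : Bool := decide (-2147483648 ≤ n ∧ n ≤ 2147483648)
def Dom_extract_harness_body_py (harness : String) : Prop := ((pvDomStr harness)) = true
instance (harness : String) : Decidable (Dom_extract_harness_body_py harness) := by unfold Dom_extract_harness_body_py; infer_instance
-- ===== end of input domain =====

-- B restructures A's stateful single pass (in_body flag) into marker-index search plus two independent region filters (alternative decomposition, same cost).

-- ===== PORT A =====
-- one loop step of A: state = (body_lines, in_body)
def pvStepA (st : List String × Bool) (line : String) : List String × Bool :=
  let stripped := PySem.Str.strip line
  if PySem.Str.startswith stripped "import sys" || PySem.Str.startswith stripped "# " then st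
  else if PySem.Str.startswith stripped "if __name__" then (st.1, true)
  else if st.2 then (st.1 ++ [line], st.2)
  else if stripped ≠ "" then (st.1 ++ [line], st.2)
  else st

def extract_harness_body_py (harness : String) : String :=
  let lines := (PySem.Str.split? (PySem.Str.strip harness) "\n").getD []
  let res := lines.foldl pvStepA ([], false)
  if res.1 = [] then "" else PySem.Str.join "\n" res.1

-- ===== PORT B =====
def pvDropped (line : String) : Bool :=
  let s := PySem.Str.strip line
  PySem.Str.startswith s "import sys" || PySem.Str.startswith s "# "

def pvMarker (line : String) : Bool :=
  PySem.Str.startswith (PySem.Str.strip line) "if __name__"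

def extract_harness_body_py_alt (harness : String) : String :=
  let lines := (PySem.Str.split? (PySem.Str.strip harness) "\n").getD []
  let kept :=
    match lines.findIdx? pvMarker with
    | none => lines.filter (fun l => !pvDropped l && (PySem.Str.strip l ≠ "" : Bool))
    | some i =>
        (lines.take i).filter (fun l => !pvDropped l && (PySem.Str.strip l ≠ "" : Bool)) ++
        (lines.drop (i + 1)).filter (fun l => !pvDropped l && !pvMarker l)
  PySem.Str.join "\n" kept

-- ===== PRECONDITION & SPEC =====
def Spec_extract_harness_body_py (harness : String) (out : String) : Prop := out = extract_harness_body_py_alt harness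
instance (harness : String) (out : String) : Decidable (Spec_extract_harness_body_py harness out) := by unfold Spec_extract_harness_body_py; infer_instance

-- ===== CLAIM (what is proved, stated in full; the proofs are below) =====
def Claim_equal_extract_harness_body_py : Prop := ∀ (harness : String), Dom_extract_harness_body_py harness → Spec_extract_harness_body_py harness (extract_harness_body_py harness)

-- ===== LEMMAS AND PROOFS =====

theorem pvStepA_drop (st : List String × Bool) (x : String) (hd : pvDropped x = true) :
    pvStepA st x = st := by
  simp only [pvDropped] at hd
  simp only [pvStepA]
  simp only [PySem.Str.startswith_eq, PySem.Str.toList_strip] at hd ⊢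
  rw [if_pos hd]

theorem pvStepA_marker (st : List String × Bool) (x : String)
    (hd : pvDropped x = false) (hm : pvMarker x = true) :
    pvStepA st x = (st.1, true) := by
  simp only [pvDropped] at hd
  simp only [pvMarker] at hm
  simp only [pvStepA]
  simp only [PySem.Str.startswith_eq, PySem.Str.toList_strip] at hd hm ⊢
  rw [if_neg (by simp_all), if_pos hm]

theorem pvStepA_keep_true (a : List String) (x : String)
    (hd : pvDropped x = false) (hm : pvMarker x = false) :
    pvStepA (a, true) x = (a ++ [x], true) := by
  simp only [pvDropped] at hd
  simp only [pvMarker] at hm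
  simp only [pvStepA]
  simp only [PySem.Str.startswith_eq, PySem.Str.toList_strip] at hd hm ⊢
  rw [if_neg (by simp_all), if_neg (by simp_all)]
  simp

theorem pvStepA_false (a : List String) (x : String)
    (hd : pvDropped x = false) (hm : pvMarker x = false) :
    pvStepA (a, false) x = (if PySem.Str.strip x ≠ "" then a ++ [x] else a, false) := by
  simp only [pvDropped] at hd
  simp only [pvMarker] at hm
  simp only [pvStepA]
  simp only [PySem.Str.startswith_eq, PySem.Str.toList_strip] at hd hm ⊢
  rw [if_neg (by simp_all), if_neg (by simp_all)]
  simp only [Bool.false_eq_true, if_false]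
  split <;> simp

-- a marker line can be neither an 'import sys' line nor a '# ' comment line
theorem pvMarker_not_dropped (l : String) (hm : pvMarker l = true) : pvDropped l = false := by
  simp only [pvMarker, PySem.Str.startswith_eq, PySem.Str.toList_strip] at hm
  simp only [pvDropped, PySem.Str.startswith_eq, PySem.Str.toList_strip, Bool.or_eq_false_iff]
  have hm' := (PySem.Chars.startswith_iff _ _).mp hm
  constructor
  · by_contra h
    rw [Bool.not_eq_false] at h
    have hor := List.prefix_or_prefix_of_prefix ((PySem.Chars.startswith_iff _ _).mp h) hm'
    revert hor; decide
  · by_contra h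
    rw [Bool.not_eq_false] at h
    have hor := List.prefix_or_prefix_of_prefix ((PySem.Chars.startswith_iff _ _).mp h) hm'
    revert hor; decide

-- while in_body = false and no marker has been seen, A's loop filters out dropped and blank lines
theorem pvFoldA_head (pre : List String) (acc : List String)
    (h : ∀ l ∈ pre, pvMarker l = false) :
    pre.foldl pvStepA (acc, false) =
      (acc ++ pre.filter (fun l => !pvDropped l && (PySem.Str.strip l ≠ "" : Bool)), false) := by
  induction pre generalizing acc with
  | nil => simp
  | cons x xs ih =>
    have hx : pvMarker x = false := h x (by simp)
    have hxs : ∀ l ∈ xs, pvMarker l = false := fun l hl => h l (by simp [hl])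
    rw [List.foldl_cons]
    by_cases hd : pvDropped x = true
    · rw [pvStepA_drop _ _ hd, ih acc hxs]
      simp [hd]
    · rw [Bool.not_eq_true] at hd
      rw [pvStepA_false _ _ hd hx]
      by_cases hb : PySem.Str.strip x = ""
      · rw [if_neg (by simp [hb]), ih acc hxs]
        simp [hd, hb]
      · rw [if_pos hb, ih (acc ++ [x]) hxs]
        simp [hd, hb]

-- once in_body = true, A's loop keeps everything except dropped and marker lines (blanks included)
theorem pvFoldA_tail (post : List String) (acc : List String) :
    post.foldl pvStepA (acc, true) =
      (acc ++ post.filter (fun l => !pvDropped l && !pvMarker l), true) := by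
  induction post generalizing acc with
  | nil => simp
  | cons x xs ih =>
    rw [List.foldl_cons]
    by_cases hd : pvDropped x = true
    · rw [pvStepA_drop _ _ hd, ih acc]
      simp [hd]
    · rw [Bool.not_eq_true] at hd
      by_cases hm : pvMarker x = true
      · rw [pvStepA_marker _ _ hd hm, ih acc]
        simp [hd, hm]
      · rw [Bool.not_eq_true] at hm
        rw [pvStepA_keep_true _ _ hd hm, ih (acc ++ [x])]
        simp [hd, hm]

theorem pvJoin_empty_iff (l : List String) :
    (if l = [] then "" else PySem.Str.join "\n" l) = PySem.Str.join "\n" l := by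
  split
  · subst ‹l = []›; rfl
  · rfl

theorem pvKept_eq (lines : List String) :
    (if (lines.foldl pvStepA ([], false)).1 = [] then ""
     else PySem.Str.join "\n" (lines.foldl pvStepA ([], false)).1) =
    PySem.Str.join "\n"
      (match lines.findIdx? pvMarker with
       | none => lines.filter (fun l => !pvDropped l && (PySem.Str.strip l ≠ "" : Bool))
       | some i =>
           (lines.take i).filter (fun l => !pvDropped l && (PySem.Str.strip l ≠ "" : Bool)) ++
           (lines.drop (i + 1)).filter (fun l => !pvDropped l && !pvMarker l)) := by
  rw [pvJoin_empty_iff]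
  congr 1
  cases hfi : lines.findIdx? pvMarker with
  | none =>
    have hnone : ∀ l ∈ lines, pvMarker l = false := by
      intro l hl
      have := List.findIdx?_eq_none_iff.mp hfi
      simpa using this l hl
    rw [pvFoldA_head lines [] hnone]
    simp
  | some i =>
    obtain ⟨hi, hpi, hlt⟩ := List.findIdx?_eq_some_iff_getElem.mp hfi
    have hdecomp : lines = lines.take i ++ lines[i] :: lines.drop (i + 1) := by
      conv_lhs => rw [← List.take_append_drop i lines]
      congr 1
      rw [List.drop_eq_getElem_cons hi]
    have hpre : ∀ l ∈ lines.take i, pvMarker l = false := by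
      intro l hl
      obtain ⟨j, hj, rfl⟩ := List.mem_take_iff_getElem.mp hl
      have := hlt j (by omega)
      simpa using this
    conv_lhs => rw [hdecomp]
    rw [List.foldl_append, pvFoldA_head _ [] hpre, List.foldl_cons,
      pvStepA_marker _ _ (pvMarker_not_dropped _ hpi) hpi, pvFoldA_tail]
    simp

-- ===== VERDICT (by name: the statement is the Claim_ definition above) =====
theorem extract_harness_body_py_spec : Claim_equal_extract_harness_body_py := by
  intro harness _
  unfold Spec_extract_harness_body_py extract_harness_body_py extract_harness_body_py_alt
  exact pvKept_eq _
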